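-- pv_equiv track=rewrite | github.com/fescofesco/CCC | Challenge 2025/Johannes/LEVEL7/level7_solution.py | generate_sequence_1d
-- ===== SOURCE A (Python) =====
-- def generate_sequence_1d(target, time_limit):
--     """Generate a 1D pace sequence to reach target position."""
--     if target == 0:
--         return [0]
--
--     direction = 1 if target > 0 else -1
--     distance = abs(target)
--     sequence = [0]
--
--     if distance == 1:
--         sequence.extend([5 * direction, 0])
--     elif distance == 2:
--         sequence.extend([5 * direction, 5 * direction, 0])
--     elif distance >= 9:
--         # Use pace 1 for efficiency
--         extra_at_1 = distance - 9
--         for pace in range(5, 0, -1):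
--             sequence.append(pace * direction)
--         for _ in range(extra_at_1):
--             sequence.append(1 * direction)
--         for pace in range(2, 6):
--             sequence.append(pace * direction)
--         sequence.append(0)
--     else:
--         # Use valley patterns for 3-8
--         patterns = {
--             3: [5, 4, 5],
--             4: [5, 4, 4, 5],
--             5: [5, 4, 3, 4, 5],
--             6: [5, 4, 3, 3, 4, 5],
--             7: [5, 4, 3, 2, 3, 4, 5],
--             8: [5, 4, 3, 2, 2, 3, 4, 5]
--         }
--         sequence.extend([p * direction for p in patterns[distance]])
--         sequence.append(0)
--
--     return sequence
-- ===== SOURCE B (Python) =====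
-- def generate_sequence_1d(target, time_limit):
--     """Generate a 1D pace sequence to reach target position."""
--     if target == 0:
--         return [0]
--     direction = 1 if target > 0 else -1
--     d = abs(target)
--     b = max(1, 5 - (d - 1) // 2)
--     r = d - 2 * (5 - b)
--     down = [p * direction for p in range(5, b, -1)]
--     return [0] + down + [b * direction] * r + down[::-1] + [0]
-- ===== Notes on version B (the rewrite author's own statement) =====
-- stated objective: simpler
-- what changed: Replaces A's four-way branch (two special cases, a 3..8 pattern dictionary, and three loops for d>=9) with one computed symmetric valley: bottom pace b = max(1, 5-(d-1)//2) held r = d-2*(5-b) times, built as [0] + descent + hold + ascent + [0].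
import Mathlib
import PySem

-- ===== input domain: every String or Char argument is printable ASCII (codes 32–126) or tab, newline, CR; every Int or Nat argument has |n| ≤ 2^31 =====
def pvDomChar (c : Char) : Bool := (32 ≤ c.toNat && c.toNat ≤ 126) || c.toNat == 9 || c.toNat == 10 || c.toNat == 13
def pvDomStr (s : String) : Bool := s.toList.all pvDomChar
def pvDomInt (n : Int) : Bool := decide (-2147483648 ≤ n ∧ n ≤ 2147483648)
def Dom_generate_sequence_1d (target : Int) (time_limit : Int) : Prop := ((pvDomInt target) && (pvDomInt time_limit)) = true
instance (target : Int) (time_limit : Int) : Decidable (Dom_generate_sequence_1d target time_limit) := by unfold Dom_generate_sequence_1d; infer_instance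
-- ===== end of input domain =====

-- B replaces A's four-way branch and pattern dictionary with one computed valley
-- (bottom pace b = max(1, 5-(d-1)//2), held r = d-2*(5-b) times); objective: simpler.
-- time_limit is accepted and ignored by both programs, exactly as in the Python.

-- ===== PORT A =====
def generate_sequence_1d (target : Int) (time_limit : Int) : List Int :=
  if target = 0 then [0]
  else
    let direction : Int := if target > 0 then 1 else -1
    let distance : Int := |target|
    let sequence : List Int := [0]
    if distance = 1 then sequence ++ [5 * direction, 0]
    else if distance = 2 then sequence ++ [5 * direction, 5 * direction, 0]
    else if distance ≥ 9 then
      let extra_at_1 := distance - 9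
      let s1 := (PySem.List.pyRange 5 0 (-1)).foldl (fun s p => s ++ [p * direction]) sequence
      let s2 := (PySem.List.pyRange 0 extra_at_1 1).foldl (fun s _ => s ++ [1 * direction]) s1
      let s3 := (PySem.List.pyRange 2 6 1).foldl (fun s p => s ++ [p * direction]) s2
      s3 ++ [0]
    else
      -- patterns[distance]: this branch only runs for distance ∈ 3..8, where the key is
      -- always present, so getD with a default is exact here (Python never raises KeyError)
      let patterns : PySem.Dict Int (List Int) := PySem.Dict.ofList
        [(3, [5,4,5]), (4, [5,4,4,5]), (5, [5,4,3,4,5]), (6, [5,4,3,3,4,5]),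
         (7, [5,4,3,2,3,4,5]), (8, [5,4,3,2,2,3,4,5])]
      sequence ++ ((patterns.getD distance []).map (fun p => p * direction)) ++ [0]

-- ===== PORT B =====
def generate_sequence_1d_alt (target : Int) (time_limit : Int) : List Int :=
  if target = 0 then [0]
  else
    let direction : Int := if target > 0 then 1 else -1
    let d : Int := |target|
    let b : Int := max 1 (5 - PySem.Int.floordiv (d - 1) 2)
    let r : Int := d - 2 * (5 - b)
    let down := (PySem.List.pyRange 5 b (-1)).map (fun p => p * direction)
    [0] ++ down ++ List.replicate r.toNat (b * direction) ++ down.reverse ++ [0]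

-- ===== PRECONDITION & SPEC =====
def Spec_generate_sequence_1d (target : Int) (time_limit : Int) (out : List Int) : Prop := out = generate_sequence_1d_alt target time_limit
instance (target : Int) (time_limit : Int) (out : List Int) : Decidable (Spec_generate_sequence_1d target time_limit out) := by unfold Spec_generate_sequence_1d; infer_instance

-- ===== CLAIM (what is proved, stated in full; the proofs are below) =====
def Claim_equal_generate_sequence_1d : Prop := ∀ (target : Int) (time_limit : Int), Dom_generate_sequence_1d target time_limit → Spec_generate_sequence_1d target time_limit (generate_sequence_1d target time_limit)

-- ===== LEMMAS AND PROOFS =====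

-- The two ports agree for every target with |target| ≥ 9 (the only unbounded branch).
theorem pv_big_case (target : Int) (time_limit : Int) (h9 : 9 ≤ |target|) :
    generate_sequence_1d target time_limit = generate_sequence_1d_alt target time_limit := by
  have h0 : target ≠ 0 := by intro h; rw [h] at h9; simp at h9
  have habs : (0:Int) < |target| := by positivity
  unfold generate_sequence_1d generate_sequence_1d_alt
  simp only [if_neg h0]
  set dir : Int := if target > 0 then 1 else -1 with hdir
  set d : Int := |target| with hd
  have hne1 : ¬ d = 1 := by omega
  have hne2 : ¬ d = 2 := by omega
  rw [if_neg hne1, if_neg hne2, if_pos h9]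
  -- b = 1 and r = d - 8 on this branch
  have hfd : PySem.Int.floordiv (d - 1) 2 = (d - 1) / 2 :=
    PySem.Int.floordiv_eq_ediv_of_pos (by norm_num)
  have hb : max 1 (5 - PySem.Int.floordiv (d - 1) 2) = 1 := by
    rw [hfd]; omega
  rw [hb]
  have hr : (d - 2 * (5 - 1)).toNat = (d - 9).toNat + 1 := by omega
  -- evaluate the three loops of A
  rw [PySem.List.foldl_append_singleton_eq_map, PySem.List.foldl_append_singleton_eq_map,
      PySem.List.foldl_append_singleton_eq_map]
  have hconst : (PySem.List.pyRange 0 (d - 9) 1).map (fun _ => (1:Int) * dir)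
      = List.replicate (d - 9).toNat (1 * dir) := by
    rw [List.map_const']
    rw [PySem.List.length_pyRange_one]
    simp
  rw [hconst, hr]
  have hdown : PySem.List.pyRange 5 1 (-1) = [5, 4, 3, 2] := by decide
  have hup : PySem.List.pyRange 2 6 1 = [2, 3, 4, 5] := by decide
  have hdn : PySem.List.pyRange 5 0 (-1) = [5, 4, 3, 2, 1] := by decide
  rw [hdown, hup, hdn, List.replicate_succ]
  simp

theorem generate_sequence_1d_spec_aux (target : Int) (time_limit : Int) :
    generate_sequence_1d target time_limit = generate_sequence_1d_alt target time_limit := by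
  by_cases hbig : 9 ≤ |target|
  · exact pv_big_case target time_limit hbig
  · obtain ⟨h1, h2⟩ := abs_lt.mp (by omega : |target| < 9)
    interval_cases target <;> rfl

-- ===== VERDICT (by name: the statement is the Claim_ definition above) =====
theorem generate_sequence_1d_spec : Claim_equal_generate_sequence_1d := by
  intro target time_limit _
  exact generate_sequence_1d_spec_aux target time_limit
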